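-- pv_equiv track=rewrite | github.com/jaume768/Mitzori-scraper-pedidos | cnfans_scraper.py | pick_hoodie_name
-- ===== SOURCE A (Python) =====
-- def pick_hoodie_name(products) -> str:
--     """
--     Devuelve un nombre "representativo" de sudadera.
--     Prioriza keywords de sudadera/hoodie; si no, el primer producto con nombre.
--     """
--     if not products:
--         return "sin producto"
--
--     keywords = ("hoodie", "sudadera", "sweatshirt", "pullover", "hood")
--     # 1) buscar por keywords
--     for p in products:
--         name = (p.get("name") or "").strip()
--         if name and any(k in name.lower() for k in keywords):
--             return name
--
--     # 2) fallback: primero con nombre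
--     for p in products:
--         name = (p.get("name") or "").strip()
--         if name:
--             return name
--
--     return "sin producto"
-- ===== SOURCE B (Python) =====
-- def pick_hoodie_name(products) -> str:
--     """Single pass: return the first keyword match immediately; remember the
--     first non-empty name as a fallback; 'sin producto' if nothing is named."""
--     keywords = ("hoodie", "sudadera", "sweatshirt", "pullover", "hood")
--     fallback = None
--     for p in products:
--         name = (p.get("name") or "").strip()
--         if name:
--             if any(k in name.lower() for k in keywords):
--                 return name
--             if fallback is None:
--                 fallback = name
--     return fallback if fallback is not None else "sin producto"
-- ===== Notes on version B (the rewrite author's own statement) =====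
-- stated objective: simpler
-- what changed: Replaced A's two full scans (keyword pass, then fallback pass) by one single pass that returns a keyword match immediately and records the first non-empty name as a fallback in an accumulator.
import Mathlib
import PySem

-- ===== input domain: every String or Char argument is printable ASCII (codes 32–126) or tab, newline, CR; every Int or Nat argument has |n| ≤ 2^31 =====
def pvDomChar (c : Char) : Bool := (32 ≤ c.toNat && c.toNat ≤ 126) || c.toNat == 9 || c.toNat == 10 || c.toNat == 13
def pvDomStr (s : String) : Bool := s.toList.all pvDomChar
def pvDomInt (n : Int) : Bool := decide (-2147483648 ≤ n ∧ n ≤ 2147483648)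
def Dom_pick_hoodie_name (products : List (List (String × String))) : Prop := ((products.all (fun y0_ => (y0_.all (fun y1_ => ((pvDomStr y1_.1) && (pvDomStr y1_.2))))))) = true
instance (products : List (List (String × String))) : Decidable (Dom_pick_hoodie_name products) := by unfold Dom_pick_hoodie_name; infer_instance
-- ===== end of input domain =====

-- B replaces A's two full scans by one pass that records the first non-empty name
-- as a fallback while returning a keyword match immediately (objective: simpler).

-- ===== PORT A =====
-- name = (p.get("name") or "").strip()  (dict lookup = first match on the assoc list)
def pvName (p : List (String × String)) : String :=
  PySem.Str.strip ((List.lookup "name" p).getD "")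

-- any(k in name.lower() for k in keywords)
def pvKw (name : String) : Bool :=
  (["hoodie", "sudadera", "sweatshirt", "pullover", "hood"]).any
    (fun k => PySem.Str.isIn k (PySem.Str.lower name))

-- first loop of A: return name on keyword match
def pvFindKw : List (List (String × String)) → Option String
  | [] => none
  | p :: rest =>
      let name := pvName p
      if name ≠ "" ∧ pvKw name then some name else pvFindKw rest

-- second loop of A: first non-empty name
def pvFindNamed : List (List (String × String)) → Option String
  | [] => none
  | p :: rest =>
      let name := pvName p
      if name ≠ "" then some name else pvFindNamed rest

def pick_hoodie_name (products : List (List (String × String))) : String :=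
  if products = [] then "sin producto"
  else
    match pvFindKw products with
    | some n => n
    | none =>
      match pvFindNamed products with
      | some n => n
      | none => "sin producto"

-- ===== PORT B =====
-- B's single loop: fb is the recorded fallback ('fallback' variable in Source B)
def pvPickLoop : List (List (String × String)) → Option String → String
  | [], fb => match fb with | some f => f | none => "sin producto"
  | p :: rest, fb =>
      let name := pvName p
      if name ≠ "" then
        if pvKw name then name
        else pvPickLoop rest (if fb.isNone then some name else fb)
      else pvPickLoop rest fb

def pick_hoodie_name_alt (products : List (List (String × String))) : String :=
  pvPickLoop products none

-- ===== PRECONDITION & SPEC =====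
def Spec_pick_hoodie_name (products : List (List (String × String))) (out : String) : Prop := out = pick_hoodie_name_alt products
instance (products : List (List (String × String))) (out : String) : Decidable (Spec_pick_hoodie_name products out) := by unfold Spec_pick_hoodie_name; infer_instance

-- ===== CLAIM (what is proved, stated in full; the proofs are below) =====
def Claim_equal_pick_hoodie_name : Prop := ∀ (products : List (List (String × String))), Dom_pick_hoodie_name products → Spec_pick_hoodie_name products (pick_hoodie_name products)

-- ===== LEMMAS AND PROOFS =====

-- characterisation of B's loop: keyword match first, then the recorded fallback,
-- then the first non-empty name, then the default
lemma pvPickLoop_eq (ps : List (List (String × String))) (fb : Option String) :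
    pvPickLoop ps fb =
      (match pvFindKw ps with
       | some n => n
       | none =>
         match fb with
         | some f => f
         | none =>
           match pvFindNamed ps with
           | some n => n
           | none => "sin producto") := by
  induction ps generalizing fb with
  | nil => cases fb <;> simp [pvPickLoop, pvFindKw, pvFindNamed]
  | cons p rest ih =>
      simp only [pvPickLoop, pvFindKw, pvFindNamed]
      by_cases hne : pvName p ≠ ""
      · by_cases hkw : pvKw (pvName p) = true
        · simp [hne, hkw]
        · simp only [hkw]
          cases fb <;> simp [hne, ih]
      · simp only [ne_eq, not_not] at hne
        simp [hne, ih]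

-- ===== VERDICT (by name: the statement is the Claim_ definition above) =====
theorem pick_hoodie_name_spec : Claim_equal_pick_hoodie_name := by
  intro products _
  unfold Spec_pick_hoodie_name pick_hoodie_name pick_hoodie_name_alt
  rw [pvPickLoop_eq]
  cases products with
  | nil => simp [pvFindKw, pvFindNamed]
  | cons p rest => simp
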